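-- pv_equiv track=rewrite | github.com/wuchenxi2587-coder/-kuairand-cross-domain-ranking | src/models/modules/feature_slices.py | build_uniform_group_slices
-- ===== SOURCE A (Python) =====
-- from typing import Callable, Dict, List, Optional, Sequence, Tuple
--
-- def build_uniform_group_slices(input_dim: int, num_groups: int) -> List[Tuple[str, Tuple[int, int]]]:
--     """当语义切片不可用时，按均匀维度兜底分组。"""
--     if input_dim <= 0:
--         raise ValueError(f"input_dim 必须 > 0，当前={input_dim}")
--
--     g = max(1, min(int(num_groups), input_dim))
--     base = input_dim // g
--     rem = input_dim % g
--
--     groups: List[Tuple[str, Tuple[int, int]]] = []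
--     start = 0
--     for idx in range(g):
--         width = base + (1 if idx < rem else 0)
--         end = start + width
--         groups.append((f"uniform_group_{idx + 1}", (start, end)))
--         start = end
--     return groups
-- ===== SOURCE B (Python) =====
-- from typing import List, Tuple
--
-- def build_uniform_group_slices(input_dim: int, num_groups: int) -> List[Tuple[str, Tuple[int, int]]]:
--     """Uniform fallback grouping: each slice computed in closed form from its index."""
--     if input_dim <= 0:
--         raise ValueError(f"input_dim 必须 > 0，当前={input_dim}")
--     g = max(1, min(int(num_groups), input_dim))
--     base = input_dim // g
--     rem = input_dim % g
--     return [
--         (f"uniform_group_{idx + 1}",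
--          (idx * base + min(idx, rem), (idx + 1) * base + min(idx + 1, rem)))
--         for idx in range(g)
--     ]
-- ===== Notes on version B (the rewrite author's own statement) =====
-- stated objective: alternative
-- what changed: Replaces the running-start accumulator loop by a comprehension that computes each group's (start, end) independently in closed form from its index (start = idx*base + min(idx, rem)).
import Mathlib
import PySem

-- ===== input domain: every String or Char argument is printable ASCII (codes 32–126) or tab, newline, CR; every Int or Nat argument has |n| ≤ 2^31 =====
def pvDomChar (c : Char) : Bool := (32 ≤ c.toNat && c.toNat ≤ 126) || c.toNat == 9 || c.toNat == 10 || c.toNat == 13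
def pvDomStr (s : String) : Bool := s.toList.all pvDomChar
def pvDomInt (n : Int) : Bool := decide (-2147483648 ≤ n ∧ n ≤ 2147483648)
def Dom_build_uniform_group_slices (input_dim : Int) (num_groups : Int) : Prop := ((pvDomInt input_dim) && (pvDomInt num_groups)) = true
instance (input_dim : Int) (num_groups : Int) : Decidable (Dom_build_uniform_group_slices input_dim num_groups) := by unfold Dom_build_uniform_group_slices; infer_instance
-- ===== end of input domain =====

-- B replaces A's running-start accumulator loop by a per-index closed form (start = idx*base + min idx rem); same cost, different decomposition.


-- ===== PORT A =====
-- A raises ValueError for input_dim ≤ 0 (excluded by Pre_); the port returns [] there.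
def build_uniform_group_slices (input_dim : Int) (num_groups : Int) : List (String × (Int × Int)) :=
  if input_dim ≤ 0 then [] else
  let g := max 1 (min num_groups input_dim)
  let base := PySem.Int.floordiv input_dim g
  let rem := PySem.Int.mod input_dim g
  ((PySem.List.pyRange 0 g 1).foldl
    (fun (st : List (String × (Int × Int)) × Int) idx =>
      let width := base + (if idx < rem then (1 : Int) else 0)
      let e := st.2 + width
      (st.1 ++ [("uniform_group_" ++ PySem.Int.toStr (idx + 1), (st.2, e))], e))
    ([], 0)).1

-- ===== PORT B =====
def build_uniform_group_slices_alt (input_dim : Int) (num_groups : Int) : List (String × (Int × Int)) :=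
  if input_dim ≤ 0 then [] else
  let g := max 1 (min num_groups input_dim)
  let base := PySem.Int.floordiv input_dim g
  let rem := PySem.Int.mod input_dim g
  (PySem.List.pyRange 0 g 1).map (fun idx =>
    ("uniform_group_" ++ PySem.Int.toStr (idx + 1),
     (idx * base + min idx rem, (idx + 1) * base + min (idx + 1) rem)))

-- ===== PRECONDITION & SPEC =====
-- Pre_ excludes exactly input_dim ≤ 0, where Python A raises ValueError (and B raises too).
def Pre_build_uniform_group_slices (input_dim : Int) (num_groups : Int) : Prop := 0 < input_dim
instance (input_dim : Int) (num_groups : Int) : Decidable (Pre_build_uniform_group_slices input_dim num_groups) := by unfold Pre_build_uniform_group_slices; infer_instance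
def pvWitness_build_uniform_group_slices : Int × Int := (10, 3)

def Spec_build_uniform_group_slices (input_dim : Int) (num_groups : Int) (out : List (String × (Int × Int))) : Prop := out = build_uniform_group_slices_alt input_dim num_groups
instance (input_dim : Int) (num_groups : Int) (out : List (String × (Int × Int))) : Decidable (Spec_build_uniform_group_slices input_dim num_groups out) := by unfold Spec_build_uniform_group_slices; infer_instance

-- ===== CLAIM (what is proved, stated in full; the proofs are below) =====
def Claim_equal_build_uniform_group_slices : Prop := ∀ (input_dim : Int) (num_groups : Int), Dom_build_uniform_group_slices input_dim num_groups → Pre_build_uniform_group_slices input_dim num_groups → Spec_build_uniform_group_slices input_dim num_groups (build_uniform_group_slices input_dim num_groups)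

-- ===== LEMMAS AND PROOFS =====

-- Loop invariant: starting the loop at index a with start = a*base + min a rem yields the
-- closed-form slices of B for indices a..g-1 and final start g*base + min g rem.
lemma uniform_loop_eq (base rem g : Int) (hrem : 0 ≤ rem) :
    ∀ (n : Nat) (a : Int) (acc : List (String × (Int × Int))), 0 ≤ a → a ≤ g → (g - a).toNat = n →
    (PySem.List.pyRange a g 1).foldl
      (fun (st : List (String × (Int × Int)) × Int) idx =>
        let width := base + (if idx < rem then (1 : Int) else 0)
        let e := st.2 + width
        (st.1 ++ [("uniform_group_" ++ PySem.Int.toStr (idx + 1), (st.2, e))], e))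
      (acc, a * base + min a rem)
    = (acc ++ (PySem.List.pyRange a g 1).map (fun idx =>
        ("uniform_group_" ++ PySem.Int.toStr (idx + 1),
         (idx * base + min idx rem, (idx + 1) * base + min (idx + 1) rem))),
       g * base + min g rem) := by
  intro n
  induction n with
  | zero =>
    intro a acc _ hag h0
    have hga : a = g := by omega
    subst hga
    simp [PySem.List.pyRange_one_eq_nil (le_refl a)]
  | succ n ih =>
    intro a acc ha hag hn
    have hlt : a < g := by omega
    rw [PySem.List.pyRange_one_cons hlt]
    simp only [List.foldl_cons, List.map_cons]
    have hmin : min a rem + (if a < rem then (1 : Int) else 0) = min (a + 1) rem := by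
      split_ifs <;> omega
    have hstep : a * base + min a rem + (base + (if a < rem then (1 : Int) else 0))
        = (a + 1) * base + min (a + 1) rem := by
      rw [← hmin]; ring
    rw [hstep]
    rw [ih (a + 1) (acc ++ [("uniform_group_" ++ PySem.Int.toStr (a + 1),
        (a * base + min a rem, (a + 1) * base + min (a + 1) rem))]) (by omega) (by omega) (by omega)]
    simp

-- ===== VERDICT (by name: the statement is the Claim_ definition above) =====
theorem build_uniform_group_slices_spec : Claim_equal_build_uniform_group_slices := by
  intro input_dim num_groups _ hpre
  unfold Spec_build_uniform_group_slices
  unfold build_uniform_group_slices build_uniform_group_slices_alt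
  have hpos : ¬ input_dim ≤ 0 := by exact not_le.mpr hpre
  simp only [hpos, if_false]
  set g := max 1 (min num_groups input_dim) with hg
  have hgpos : 0 < g := by omega
  have hrem : 0 ≤ PySem.Int.mod input_dim g := by
    rw [PySem.Int.mod_eq_emod_of_pos hgpos]
    exact Int.emod_nonneg _ (by omega)
  have h0 : (0 : Int) = 0 * (PySem.Int.floordiv input_dim g) + min 0 (PySem.Int.mod input_dim g) := by
    simp [min_eq_left hrem]
  rw [show (([] : List (String × (Int × Int))), (0 : Int)) =
      (([] : List (String × (Int × Int))), 0 * (PySem.Int.floordiv input_dim g) + min 0 (PySem.Int.mod input_dim g)) from by rw [← h0]]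
  rw [uniform_loop_eq (PySem.Int.floordiv input_dim g) (PySem.Int.mod input_dim g) g hrem
      (g - 0).toNat 0 [] (le_refl 0) (by omega) rfl]
  simp
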